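-- pv_equiv track=rewrite | github.com/Davidvandijcke/fdr | src/archive/primaldual_v2.py | convert_interleaved_to_layered
-- ===== SOURCE A (Python) =====
-- def convert_interleaved_to_layered(aOut, aIn, w, h, nc):
--     if nc==1:
--         aOut=aIn
--         return aOut
--     nOmega = w*h
--     for y in range(h):
--         for x in range(w):
--             for c in range(nc):
--                 aOut[x + w*y + nOmega*c] = aIn[(nc-1-c) + nc*(x + w*y)]
--     return aOut
-- ===== SOURCE B (Python) =====
-- def convert_interleaved_to_layered(aOut, aIn, w, h, nc):
--     if nc == 1:
--         aOut = aIn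
--         return aOut
--     n = w * h
--     if nc <= 0 or w <= 0 or h <= 0:
--         return aOut
--     layered = []
--     for c in range(nc - 1, -1, -1):
--         layered += aIn[c : nc * n : nc]
--     aOut[:nc * n] = layered
--     return aOut
-- ===== Notes on version B (the rewrite author's own statement) =====
-- stated objective: alternative
-- what changed: Replaces A's three nested destination-driven coordinate loops of element writes with a plane-at-a-time gather: each channel plane is extracted in one strided slice aIn[c:nc*n:nc], the planes are concatenated in reversed channel order, and the result is spliced into aOut's prefix with a single slice assignment.
import Mathlib
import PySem

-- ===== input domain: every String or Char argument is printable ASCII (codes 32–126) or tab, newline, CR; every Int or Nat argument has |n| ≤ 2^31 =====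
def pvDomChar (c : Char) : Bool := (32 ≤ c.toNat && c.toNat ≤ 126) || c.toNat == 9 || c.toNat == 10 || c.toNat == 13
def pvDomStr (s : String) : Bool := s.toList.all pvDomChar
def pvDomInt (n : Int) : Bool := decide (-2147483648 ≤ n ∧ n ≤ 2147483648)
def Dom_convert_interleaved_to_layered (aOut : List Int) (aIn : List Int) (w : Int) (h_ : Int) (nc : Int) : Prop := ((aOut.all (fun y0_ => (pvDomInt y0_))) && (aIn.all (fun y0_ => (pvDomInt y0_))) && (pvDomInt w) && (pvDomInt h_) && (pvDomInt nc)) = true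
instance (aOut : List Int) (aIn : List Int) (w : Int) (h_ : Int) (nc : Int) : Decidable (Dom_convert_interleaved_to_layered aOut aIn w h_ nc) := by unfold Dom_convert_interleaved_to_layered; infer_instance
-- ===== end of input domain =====

-- B builds the layered buffer plane-at-a-time (one strided slice per channel, concatenated in
-- reversed channel order, then spliced into aOut's prefix) instead of A's three nested per-element
-- write loops (alternative decomposition, same cost); in Python both mutate aOut in place, and the
-- equivalence proved here is about the return value.

-- ===== PORT A =====
def convert_interleaved_to_layered (aOut : List Int) (aIn : List Int) (w : Int) (h_ : Int) (nc : Int) : List Int :=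
  if nc == 1 then aIn
  else
    let nOmega := w * h_
    (PySem.List.pyRange 0 h_ 1).foldl (fun acc y =>
      (PySem.List.pyRange 0 w 1).foldl (fun acc x =>
        (PySem.List.pyRange 0 nc 1).foldl (fun acc c =>
          PySem.List.pySetD acc (x + w * y + nOmega * c)
            (PySem.List.pyGetD aIn ((nc - 1 - c) + nc * (x + w * y)) 0)) acc) acc) aOut

-- ===== PORT B =====
def convert_interleaved_to_layered_alt (aOut : List Int) (aIn : List Int) (w : Int) (h_ : Int) (nc : Int) : List Int :=
  if nc == 1 then aIn
  else
    let n := w * h_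
    if nc ≤ 0 ∨ w ≤ 0 ∨ h_ ≤ 0 then aOut
    else
      let layered := (PySem.List.pyRange (nc - 1) (-1) (-1)).foldl
        (fun acc c => acc ++ (PySem.List.slice? aIn (some c) (some (nc * n)) nc).getD []) ([] : List Int)
      layered ++ aOut.drop (PySem.List.clampIdx aOut.length (nc * n))

-- ===== PRECONDITION & SPEC =====
-- Pre_ excludes exactly the inputs on which A raises IndexError: nc ≥ 2 with positive w, h but a
-- destination or source buffer shorter than nc*w*h.
def Pre_convert_interleaved_to_layered (aOut : List Int) (aIn : List Int) (w : Int) (h_ : Int) (nc : Int) : Prop :=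
  nc = 1 ∨ nc ≤ 0 ∨ w ≤ 0 ∨ h_ ≤ 0 ∨ (nc * w * h_ ≤ aOut.length ∧ nc * w * h_ ≤ aIn.length)
instance (aOut : List Int) (aIn : List Int) (w : Int) (h_ : Int) (nc : Int) : Decidable (Pre_convert_interleaved_to_layered aOut aIn w h_ nc) := by unfold Pre_convert_interleaved_to_layered; infer_instance

def pvWitness_convert_interleaved_to_layered : List Int × List Int × Int × Int × Int :=
  ([0, 0, 0, 0, 0, 0], [1, 2, 3, 4, 5, 6], 3, 1, 2)

def Spec_convert_interleaved_to_layered (aOut : List Int) (aIn : List Int) (w : Int) (h_ : Int) (nc : Int) (out : List Int) : Prop := out = convert_interleaved_to_layered_alt aOut aIn w h_ nc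
instance (aOut : List Int) (aIn : List Int) (w : Int) (h_ : Int) (nc : Int) (out : List Int) : Decidable (Spec_convert_interleaved_to_layered aOut aIn w h_ nc out) := by unfold Spec_convert_interleaved_to_layered; infer_instance

-- ===== CLAIM =====
def Claim_equal_convert_interleaved_to_layered : Prop := ∀ (aOut : List Int) (aIn : List Int) (w : Int) (h_ : Int) (nc : Int), Dom_convert_interleaved_to_layered aOut aIn w h_ nc → Pre_convert_interleaved_to_layered aOut aIn w h_ nc → Spec_convert_interleaved_to_layered aOut aIn w h_ nc (convert_interleaved_to_layered aOut aIn w h_ nc)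

-- ===== LEMMAS AND PROOFS =====

-- single write / list of writes, as (index, value) pairs
def pvWr (l : List Int) (iv : Int × Int) : List Int := PySem.List.pySetD l iv.1 iv.2
def pvWrites (l : List Int) (ws : List (Int × Int)) : List Int := ws.foldl pvWr l

-- the flat list of writes A performs (in A's order)
def pvF (aIn : List Int) (w h_ nc : Int) : List (Int × Int) :=
  ((PySem.List.pyRange 0 h_ 1).map (fun y =>
    ((PySem.List.pyRange 0 w 1).map (fun x =>
      (PySem.List.pyRange 0 nc 1).map (fun c =>
        (x + w * y + (w * h_) * c,
         PySem.List.pyGetD aIn ((nc - 1 - c) + nc * (x + w * y)) 0)))).flatten)).flatten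

-- the layered prefix, as a flatten of channel rows (row j = plane read at stride nc, offset nc-1-j)
def pvL (aIn : List Int) (w h_ nc : Int) : List Int :=
  ((List.range nc.toNat).map (fun (j : Nat) =>
    (List.range (w * h_).toNat).map (fun (k : Nat) =>
      PySem.List.pyGetD aIn ((nc - 1 - (j : Int)) + nc * (k : Int)) 0))).flatten

-- the common normal form of both results
def pvT (aOut aIn : List Int) (w h_ nc : Int) : List Int :=
  pvL aIn w h_ nc ++ aOut.drop (nc * (w * h_)).toNat

theorem pvL_length (aIn : List Int) (w h_ nc : Int) :
    (pvL aIn w h_ nc).length = nc.toNat * (w * h_).toNat := by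
  simp [pvL, List.length_flatten, List.map_map, Function.comp_def, List.map_const']

theorem pvGetD_nonneg (xs : List Int) (i : Int) (d : Int) (h0 : 0 ≤ i) :
    PySem.List.pyGetD xs i d = (xs[i.toNat]?).getD d := by
  simp only [PySem.List.pyGetD, PySem.List.pyGet?, PySem.List.pyIdx?, if_pos h0]
  split_ifs with h
  · rfl
  · rw [List.getElem?_eq_none (by omega)]; rfl

-- a fold of in-range writes is pointwise determined
theorem pvWrites_pointwise (ws : List (Int × Int)) : ∀ (l T : List Int),
    T.length = l.length →
    (∀ iv ∈ ws, 0 ≤ iv.1 ∧ iv.1.toNat < l.length) →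
    (∀ i : Nat, i < l.length → (∀ iv ∈ ws, iv.1.toNat ≠ i) → T[i]? = l[i]?) →
    (∀ iv ∈ ws, T[iv.1.toNat]? = some iv.2) →
    pvWrites l ws = T := by
  induction ws with
  | nil =>
    intro l T hlen _ hcov _
    show l = T
    refine (List.ext_getElem? fun i => ?_).symm
    by_cases hi : i < l.length
    · exact hcov i hi (fun iv h => absurd h (List.not_mem_nil))
    · rw [List.getElem?_eq_none (by omega), List.getElem?_eq_none (by omega)]
  | cons a ws ih =>
    intro l T hlen hin hcov hval
    have ha := hin a List.mem_cons_self
    have hset : pvWr l a = l.set a.1.toNat a.2 := by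
      simp [pvWr, PySem.List.pySetD_of_nonneg _ _ ha.1]
    show pvWrites (pvWr l a) ws = T
    rw [hset]
    refine ih (l.set a.1.toNat a.2) T (by simpa using hlen)
      (fun iv h => by simpa using hin iv (List.mem_cons_of_mem a h)) ?_
      (fun iv h => hval iv (List.mem_cons_of_mem a h))
    intro i hi hun
    by_cases hia : a.1.toNat = i
    · rw [← hia, List.getElem?_set_self ha.2, hval a List.mem_cons_self]
    · rw [List.getElem?_set_ne hia]
      refine hcov i (by simpa using hi) ?_
      intro iv hiv
      rcases List.mem_cons.mp hiv with h | h
      · rw [h]; exact hia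
      · exact hun iv h

-- getElem? into a flatten of equal-length rows
theorem pvFlatten_getElem? (n : Nat) : ∀ (L : List (List Int)) (q r : Nat),
    (∀ row ∈ L, row.length = n) → r < n →
    L.flatten[q * n + r]? = L[q]?.bind (fun row => row[r]?) := by
  intro L
  induction L with
  | nil => intro q r _ _; simp
  | cons row L ih =>
    intro q r hrow hr
    have hlen : row.length = n := hrow row List.mem_cons_self
    cases q with
    | zero =>
      simp only [List.flatten_cons, Nat.zero_mul, Nat.zero_add]
      rw [List.getElem?_append_left (by omega)]
      simp
    | succ q =>
      simp only [List.flatten_cons]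
      have harith : (q + 1) * n + r = row.length + (q * n + r) := by rw [hlen]; ring
      rw [harith, List.getElem?_append_right (Nat.le_add_right _ _),
        Nat.add_sub_cancel_left, ih q r (fun row' h => hrow row' (List.mem_cons_of_mem _ h)) hr]
      simp

theorem pvFilterMap_some (m : Nat) (f : Nat → Option Int) (g : Nat → Int)
    (h : ∀ k < m, f k = some (g k)) : (List.range m).filterMap f = (List.range m).map g := by
  induction m with
  | zero => simp
  | succ m ih =>
    rw [List.range_succ, List.filterMap_append, List.map_append,
      ih (fun k hk => h k (by omega))]
    simp [h m (by omega)]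

-- Python's strided slice xs[c : nc*n : nc] as a range-map
theorem pvPlane (xs : List Int) (c nc n : Int) (h0 : 0 ≤ c) (hc : c < nc) (hn : 0 < n)
    (hlen : nc * n ≤ (xs.length : Int)) :
    (PySem.List.slice? xs (some c) (some (nc * n)) nc).getD [] =
      (List.range n.toNat).map (fun (k : Nat) => PySem.List.pyGetD xs (c + nc * (k : Int)) 0) := by
  have hnc : 0 < nc := lt_of_le_of_lt h0 hc
  have hncn : nc ≤ nc * n := le_mul_of_one_le_right hnc.le (by omega)
  have hstart : min c (xs.length : Int) = c := min_eq_left (by omega)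
  have hstop : min (nc * n) (xs.length : Int) = nc * n := min_eq_left hlen
  have hdiv : (nc * n - c + nc - 1) / nc = n := by
    have he : nc * n - c + nc - 1 = (nc - 1 - c) + n * nc := by ring
    rw [he, Int.add_mul_ediv_right _ _ hnc.ne', Int.ediv_eq_zero_of_lt (by omega) (by omega),
      zero_add]
  simp only [PySem.List.slice?, PySem.List.sliceIndices, if_neg hnc.ne',
    if_neg (not_lt.mpr hnc.le), if_neg (not_lt.mpr h0),
    if_neg (not_lt.mpr (by omega : (0:Int) ≤ nc * n)),
    hstart, hstop, if_pos hnc, if_pos (show c < nc * n by omega), hdiv, Option.getD_some]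
  refine pvFilterMap_some n.toNat _ _ ?_
  intro k hk
  have hidx0 : 0 ≤ c + nc * (k : Int) :=
    add_nonneg h0 (mul_nonneg hnc.le (Int.natCast_nonneg k))
  have hidx : c + nc * (k : Int) < nc * n := by
    have := mul_le_mul_of_nonneg_left (show (k : Int) ≤ n - 1 by omega) hnc.le
    nlinarith
  have hlt : (c + nc * (k : Int)).toNat < xs.length := by omega
  rw [List.getElem?_eq_getElem hlt, pvGetD_nonneg xs _ 0 hidx0, List.getElem?_eq_getElem hlt]
  rfl

-- A's loop nest is the fold of its flat write list
theorem pvA_eq (aOut aIn : List Int) (w h_ nc : Int) (hne : (nc == 1) = false) :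
    convert_interleaved_to_layered aOut aIn w h_ nc = pvWrites aOut (pvF aIn w h_ nc) := by
  simp [convert_interleaved_to_layered, hne, pvWrites, pvF, List.foldl_flatten, List.foldl_map,
    pvWr]

theorem pvMemF (aIn : List Int) (w h_ nc : Int) (iv : Int × Int) :
    iv ∈ pvF aIn w h_ nc ↔ ∃ y, (0 ≤ y ∧ y < h_) ∧ ∃ x, (0 ≤ x ∧ x < w) ∧ ∃ c, (0 ≤ c ∧ c < nc) ∧
      (x + w * y + (w * h_) * c, PySem.List.pyGetD aIn ((nc - 1 - c) + nc * (x + w * y)) 0) = iv := by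
  simp [pvF, PySem.List.mem_pyRange_one]

theorem pvP_bounds (x y w h_ : Int) (hx0 : 0 ≤ x) (hx : x < w) (hy0 : 0 ≤ y) (hy : y < h_) :
    0 ≤ x + w * y ∧ x + w * y < w * h_ := by
  have hw : 0 < w := lt_of_le_of_lt hx0 hx
  have h1 := mul_le_mul_of_nonneg_left (show y ≤ h_ - 1 by omega) hw.le
  have h2 := mul_nonneg hw.le hy0
  constructor
  · omega
  · nlinarith

theorem pvIdx_bounds (x y c w h_ nc : Int) (hx0 : 0 ≤ x) (hx : x < w) (hy0 : 0 ≤ y) (hy : y < h_)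
    (hc0 : 0 ≤ c) (hc : c < nc) :
    0 ≤ x + w * y + (w * h_) * c ∧ x + w * y + (w * h_) * c < nc * (w * h_) := by
  have hw : 0 < w := lt_of_le_of_lt hx0 hx
  have hh : 0 < h_ := lt_of_le_of_lt hy0 hy
  obtain ⟨hp0, hpl⟩ := pvP_bounds x y w h_ hx0 hx hy0 hy
  have h2 := mul_le_mul_of_nonneg_left (show c ≤ nc - 1 by omega) (mul_nonneg hw.le hh.le)
  have h3 := mul_nonneg (mul_nonneg hw.le hh.le) hc0
  constructor
  · omega
  · nlinarith

theorem convert_interleaved_to_layered_spec : Claim_equal_convert_interleaved_to_layered := by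
  intro aOut aIn w h_ nc _ hpre
  unfold Spec_convert_interleaved_to_layered
  by_cases h1 : nc = 1
  · simp [convert_interleaved_to_layered, convert_interleaved_to_layered_alt, h1]
  · have hne : (nc == 1) = false := by simp [h1]
    by_cases hdeg : nc ≤ 0 ∨ w ≤ 0 ∨ h_ ≤ 0
    · have hB : convert_interleaved_to_layered_alt aOut aIn w h_ nc = aOut := by
        simp only [convert_interleaved_to_layered_alt, hne, Bool.false_eq_true, if_false]
        rw [if_pos hdeg]
      rw [hB]
      rcases hdeg with hn | hw | hh
      · simp [convert_interleaved_to_layered, hne, PySem.List.pyRange_one_eq_nil hn]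
      · simp [convert_interleaved_to_layered, hne, PySem.List.pyRange_one_eq_nil hw]
      · simp [convert_interleaved_to_layered, hne, PySem.List.pyRange_one_eq_nil hh]
    · push_neg at hdeg
      obtain ⟨hn, hw, hh⟩ := hdeg
      have hpos : (0 : Int) < w * h_ := mul_pos hw hh
      have hm0 : (0 : Int) < nc * (w * h_) := mul_pos hn hpos
      have hlenO : nc * (w * h_) ≤ (aOut.length : Int) := by
        rcases hpre with h | h | h | h | h
        · omega
        · omega
        · omega
        · omega
        · calc nc * (w * h_) = nc * w * h_ := by ring
            _ ≤ _ := h.1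
      have hlenI : nc * (w * h_) ≤ (aIn.length : Int) := by
        rcases hpre with h | h | h | h | h
        · omega
        · omega
        · omega
        · omega
        · calc nc * (w * h_) = nc * w * h_ := by ring
            _ ≤ _ := h.2
      have hNmul : (nc * (w * h_)).toNat = nc.toNat * (w * h_).toNat :=
        Int.toNat_mul hn.le hpos.le
      have hLlen : (pvL aIn w h_ nc).length = (nc * (w * h_)).toNat := by
        rw [pvL_length, hNmul]
      -- B equals the normal form
      have eqB : convert_interleaved_to_layered_alt aOut aIn w h_ nc = pvT aOut aIn w h_ nc := by
        simp only [convert_interleaved_to_layered_alt, hne, Bool.false_eq_true, if_false]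
        rw [if_neg (by push_neg; exact ⟨hn, hw, hh⟩)]
        have hclamp : PySem.List.clampIdx aOut.length (nc * (w * h_)) = (nc * (w * h_)).toNat := by
          simp only [PySem.List.clampIdx, if_neg (by omega : ¬ nc * (w * h_) < 0)]
          omega
        rw [hclamp]
        unfold pvT
        congr 1
        rw [PySem.List.pyRange_neg_one (nc - 1) (-1), List.foldl_map,
          PySem.List.foldl_append_eq_flatMap, List.nil_append,
          show (nc - 1 - (-1)).toNat = nc.toNat by omega]
        unfold pvL
        rw [List.flatMap_def]
        congr 1
        refine List.map_congr_left ?_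
        intro k hk
        have hk' : k < nc.toNat := List.mem_range.mp hk
        exact pvPlane aIn (nc - 1 - (k : Int)) nc (w * h_) (by omega) (by omega) hpos hlenI
      -- A equals the normal form
      have eqA : convert_interleaved_to_layered aOut aIn w h_ nc = pvT aOut aIn w h_ nc := by
        rw [pvA_eq aOut aIn w h_ nc hne]
        refine pvWrites_pointwise _ aOut (pvT aOut aIn w h_ nc) ?_ ?_ ?_ ?_
        · simp only [pvT, List.length_append, hLlen, List.length_drop]
          omega
        · intro iv hiv
          rw [pvMemF] at hiv
          obtain ⟨y, hy, x, hx, c, hc, heq⟩ := hiv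
          subst heq
          obtain ⟨hb0, hbl⟩ := pvIdx_bounds x y c w h_ nc hx.1 hx.2 hy.1 hy.2 hc.1 hc.2
          refine ⟨hb0, ?_⟩
          show (x + w * y + (w * h_) * c).toNat < aOut.length
          omega
        · intro i hi hun
          have hNi : (nc * (w * h_)).toNat ≤ i := by
            by_contra hlt
            push_neg at hlt
            have hiZ : ((i : Int)) < nc * (w * h_) := by omega
            have hp0 : 0 ≤ (i : Int) % (w * h_) := Int.emod_nonneg _ hpos.ne'
            have hpl : (i : Int) % (w * h_) < w * h_ := Int.emod_lt_of_pos _ hpos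
            have hc0 : 0 ≤ (i : Int) / (w * h_) := Int.ediv_nonneg (by omega) hpos.le
            have hcl : (i : Int) / (w * h_) < nc := by
              rw [Int.ediv_lt_iff_lt_mul hpos]; exact hiZ
            have hx0 : 0 ≤ ((i : Int) % (w * h_)) % w := Int.emod_nonneg _ hw.ne'
            have hxl : ((i : Int) % (w * h_)) % w < w := Int.emod_lt_of_pos _ hw
            have hy0 : 0 ≤ ((i : Int) % (w * h_)) / w := Int.ediv_nonneg hp0 hw.le
            have hyl : ((i : Int) % (w * h_)) / w < h_ := by
              rw [Int.ediv_lt_iff_lt_mul hw]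
              calc (i : Int) % (w * h_) < w * h_ := hpl
                _ = h_ * w := by ring
            have hrec1 : ((i : Int) % (w * h_)) % w + w * (((i : Int) % (w * h_)) / w)
                = (i : Int) % (w * h_) := Int.emod_add_ediv _ _
            have hrec2 : (i : Int) % (w * h_) + (w * h_) * ((i : Int) / (w * h_))
                = (i : Int) := Int.emod_add_ediv _ _
            have hmem : ((((i : Int) % (w * h_)) % w + w * (((i : Int) % (w * h_)) / w)
                  + (w * h_) * ((i : Int) / (w * h_)),
                PySem.List.pyGetD aIn ((nc - 1 - (i : Int) / (w * h_))
                  + nc * (((i : Int) % (w * h_)) % w + w * (((i : Int) % (w * h_)) / w))) 0)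
                  : Int × Int) ∈ pvF aIn w h_ nc := by
              rw [pvMemF]
              exact ⟨_, ⟨hy0, hyl⟩, _, ⟨hx0, hxl⟩, _, ⟨hc0, hcl⟩, rfl⟩
            refine hun _ hmem ?_
            show (((i : Int) % (w * h_)) % w + w * (((i : Int) % (w * h_)) / w)
                + (w * h_) * ((i : Int) / (w * h_))).toNat = i
            omega
          unfold pvT
          rw [List.getElem?_append_right (by rw [hLlen]; exact hNi), List.getElem?_drop]
          congr 1
          rw [hLlen]
          omega
        · intro iv hiv
          rw [pvMemF] at hiv
          obtain ⟨y, hy, x, hx, c, hc, heq⟩ := hiv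
          subst heq
          obtain ⟨hp0, hpl⟩ := pvP_bounds x y w h_ hx.1 hx.2 hy.1 hy.2
          obtain ⟨hb0, hbl⟩ := pvIdx_bounds x y c w h_ nc hx.1 hx.2 hy.1 hy.2 hc.1 hc.2
          have hcast : ((c.toNat * (w * h_).toNat : Nat) : Int) = (w * h_) * c := by
            push_cast [Int.toNat_of_nonneg hc.1, Int.toNat_of_nonneg hpos.le]
            ring
          have hidxNat : (x + w * y + (w * h_) * c).toNat
              = c.toNat * (w * h_).toNat + (x + w * y).toNat := by
            generalize hQ : c.toNat * (w * h_).toNat = Q at hcast ⊢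
            omega
          show (pvT aOut aIn w h_ nc)[(x + w * y + (w * h_) * c).toNat]?
              = some (PySem.List.pyGetD aIn ((nc - 1 - c) + nc * (x + w * y)) 0)
          rw [hidxNat]
          unfold pvT
          rw [List.getElem?_append_left (by
            rw [hLlen, hNmul]
            generalize hQ : c.toNat * (w * h_).toNat = Q at hcast ⊢
            have hMc : ((nc.toNat * (w * h_).toNat : Nat) : Int) = nc * (w * h_) := by
              push_cast [Int.toNat_of_nonneg hn.le, Int.toNat_of_nonneg hpos.le]
              ring
            generalize hM : nc.toNat * (w * h_).toNat = M at hMc ⊢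
            omega)]
          unfold pvL
          rw [pvFlatten_getElem? (w * h_).toNat _ c.toNat (x + w * y).toNat
            (by
              intro row hrow
              simp only [List.mem_map] at hrow
              obtain ⟨j, _, rfl⟩ := hrow
              simp)
            (by omega)]
          rw [List.getElem?_map, List.getElem?_range (show c.toNat < nc.toNat by omega)]
          simp only [Option.map_some, Option.bind_some]
          rw [List.getElem?_map, List.getElem?_range (show (x + w * y).toNat < (w * h_).toNat by omega)]
          simp only [Option.map_some]
          rw [Int.toNat_of_nonneg hc.1, Int.toNat_of_nonneg hp0]
      rw [eqA, eqB]
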